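-- pv_equiv track=rewrite | github.com/themoronss/genios-brain | app/tasks/gmail_sync.py | is_automated_email
-- ===== SOURCE A (Python) =====
-- AUTOMATED_EMAIL_PATTERNS = [
--     "noreply",
--     "no-reply",
--     "donotreply",
--     "do-not-reply",
--     "newsletter",
--     "digest",
--     "alert",
--     "notification",
--     "automated",
--     "bounce",
--     "mailer-daemon",
--     "postmaster",
--     "jobnotification",
--     "jobalert",
-- ]
--
-- AUTOMATED_DOMAINS = [
--     "@linkedin.com",
--     "@substack.com",
--     "@medium.com",
--     "@facebookmail.com",
--     "@notifications.",
--     "@alert.",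
-- ]
--
-- def is_automated_email(email, name):
--     """
--     Check if an email address is from an automated sender.
--     """
--     if not email:
--         return True
--
--     email_lower = email.lower()
--     name_lower = (name or "").lower()
--
--     for pattern in AUTOMATED_EMAIL_PATTERNS:
--         if pattern in email_lower or pattern in name_lower:
--             return True
--
--     for domain in AUTOMATED_DOMAINS:
--         if domain in email_lower:
--             return True
--
--     return False
-- ===== SOURCE B (Python) =====
-- import re
--
-- AUTOMATED_EMAIL_PATTERNS = [
--     "noreply",
--     "no-reply",
--     "donotreply",
--     "do-not-reply",
--     "newsletter",
--     "digest",
--     "alert",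
--     "notification",
--     "automated",
--     "bounce",
--     "mailer-daemon",
--     "postmaster",
--     "jobnotification",
--     "jobalert",
-- ]
--
-- AUTOMATED_DOMAINS = [
--     "@linkedin.com",
--     "@substack.com",
--     "@medium.com",
--     "@facebookmail.com",
--     "@notifications.",
--     "@alert.",
-- ]
--
-- _PATTERN_RE = re.compile("|".join(re.escape(p) for p in AUTOMATED_EMAIL_PATTERNS))
-- _DOMAIN_RE = re.compile("|".join(re.escape(d) for d in AUTOMATED_DOMAINS))
--
--
-- def is_automated_email(email, name):
--     """
--     Check if an email address is from an automated sender.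
--     """
--     if not email:
--         return True
--
--     email_lower = email.lower()
--     name_lower = (name or "").lower()
--
--     return bool(
--         _PATTERN_RE.search(email_lower)
--         or _PATTERN_RE.search(name_lower)
--         or _DOMAIN_RE.search(email_lower)
--     )
-- ===== Notes on version B (the rewrite author's own statement) =====
-- stated objective: idiomatic
-- what changed: Replaces the two explicit per-pattern substring-scanning loops with two precompiled alternation regexes (escaped literals) searched once per haystack, returning the boolean of a single or-expression instead of early-return loops.
import Mathlib
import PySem

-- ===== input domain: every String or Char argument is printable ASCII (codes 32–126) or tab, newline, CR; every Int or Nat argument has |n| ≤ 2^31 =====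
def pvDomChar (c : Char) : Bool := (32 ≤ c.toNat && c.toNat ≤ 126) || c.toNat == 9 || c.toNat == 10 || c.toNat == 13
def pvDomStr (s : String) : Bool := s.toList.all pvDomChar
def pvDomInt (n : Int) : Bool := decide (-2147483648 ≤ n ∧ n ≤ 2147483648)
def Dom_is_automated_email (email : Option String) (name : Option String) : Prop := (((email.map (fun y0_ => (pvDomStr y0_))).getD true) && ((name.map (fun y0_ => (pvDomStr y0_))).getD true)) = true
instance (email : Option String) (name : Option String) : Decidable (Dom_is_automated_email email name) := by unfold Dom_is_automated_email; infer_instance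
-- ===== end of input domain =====

-- B replaces A's two explicit per-pattern scanning loops with precompiled alternation regexes
-- (escaped literals) searched once per haystack (objective: idiomatic; same asymptotic cost).

def AUTOMATED_EMAIL_PATTERNS : List String :=
  ["noreply", "no-reply", "donotreply", "do-not-reply", "newsletter", "digest",
   "alert", "notification", "automated", "bounce", "mailer-daemon", "postmaster",
   "jobnotification", "jobalert"]

def AUTOMATED_DOMAINS : List String :=
  ["@linkedin.com", "@substack.com", "@medium.com", "@facebookmail.com",
   "@notifications.", "@alert."]

-- ===== PORT A =====
-- 'for pattern in AUTOMATED_EMAIL_PATTERNS: if pattern in email_lower or pattern in name_lower: return True'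
def patternLoop : List String → String → String → Bool
  | [], _, _ => false
  | p :: rest, el, nl =>
    if PySem.Str.isIn p el || PySem.Str.isIn p nl then true
    else patternLoop rest el nl

-- 'for domain in AUTOMATED_DOMAINS: if domain in email_lower: return True'
def domainLoop : List String → String → Bool
  | [], _ => false
  | d :: rest, el => if PySem.Str.isIn d el then true else domainLoop rest el

def is_automated_email (email : Option String) (name : Option String) : Bool :=
  match email with
  | none => true                        -- 'if not email: return True'
  | some e =>
    if e = "" then true
    else
      let email_lower := PySem.Str.lower e
      let name_lower := PySem.Str.lower (name.getD "")   -- (name or "").lower()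
      if patternLoop AUTOMATED_EMAIL_PATTERNS email_lower name_lower then true
      else domainLoop AUTOMATED_DOMAINS email_lower

-- ===== PORT B =====
-- re.search of a '|'-joined alternation of re.escape'd literals succeeds iff some
-- literal occurs as a substring: exact for alternations of escaped literals.
def regexSearchAlt (pats : List String) (s : String) : Bool :=
  pats.any (fun p => PySem.Str.isIn p s)

def is_automated_email_alt (email : Option String) (name : Option String) : Bool :=
  match email with
  | none => true
  | some e =>
    if e = "" then true
    else
      let email_lower := PySem.Str.lower e
      let name_lower := PySem.Str.lower (name.getD "")
      regexSearchAlt AUTOMATED_EMAIL_PATTERNS email_lower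
        || regexSearchAlt AUTOMATED_EMAIL_PATTERNS name_lower
        || regexSearchAlt AUTOMATED_DOMAINS email_lower

-- ===== PRECONDITION & SPEC =====
def Spec_is_automated_email (email : Option String) (name : Option String) (out : Bool) : Prop := out = is_automated_email_alt email name
instance (email : Option String) (name : Option String) (out : Bool) : Decidable (Spec_is_automated_email email name out) := by unfold Spec_is_automated_email; infer_instance

-- ===== CLAIM (what is proved, stated in full; the proofs are below) =====
def Claim_equal_is_automated_email : Prop := ∀ (email : Option String) (name : Option String), Dom_is_automated_email email name → Spec_is_automated_email email name (is_automated_email email name)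

-- ===== LEMMAS AND PROOFS =====
theorem patternLoop_eq (l : List String) (el nl : String) :
    patternLoop l el nl
      = (l.any (fun p => PySem.Str.isIn p el) || l.any (fun p => PySem.Str.isIn p nl)) := by
  induction l with
  | nil => rfl
  | cons p rest ih =>
    show (if PySem.Str.isIn p el || PySem.Str.isIn p nl then true else patternLoop rest el nl) = _
    rw [List.any_cons, List.any_cons, ih]
    cases PySem.Str.isIn p el <;> cases PySem.Str.isIn p nl <;>
      simp [Bool.or_assoc, Bool.or_left_comm]

theorem domainLoop_eq (l : List String) (el : String) :
    domainLoop l el = l.any (fun d => PySem.Str.isIn d el) := by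
  induction l with
  | nil => rfl
  | cons d rest ih =>
    show (if PySem.Str.isIn d el then true else domainLoop rest el) = _
    rw [List.any_cons, ih]
    cases PySem.Str.isIn d el <;> simp

-- ===== VERDICT (by name: the statement is the Claim_ definition above) =====
theorem is_automated_email_spec : Claim_equal_is_automated_email := by
  intro email name _
  unfold Spec_is_automated_email
  cases email with
  | none => rfl
  | some e =>
    simp only [is_automated_email, is_automated_email_alt, regexSearchAlt]
    split
    · rfl
    · rw [patternLoop_eq, domainLoop_eq]
      cases hA : AUTOMATED_EMAIL_PATTERNS.any
          (fun p => PySem.Str.isIn p (PySem.Str.lower e)) <;>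
        cases hB : AUTOMATED_EMAIL_PATTERNS.any
            (fun p => PySem.Str.isIn p (PySem.Str.lower (name.getD ""))) <;>
          simp
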